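-- pv_equiv track=rewrite | github.com/phsrod/padroesResiliencia | scripts/run_demo.py | build_urls
-- ===== SOURCE A (Python) =====
-- HTTPBIN = 'https://httpbin.org'
--
-- def build_urls(count: int):
--     urls = []
--     for i in range(count):
--         if i % 5 == 0:
--             urls.append(f"{HTTPBIN}/status/500")
--         elif i % 3 == 0:
--             urls.append(f"{HTTPBIN}/delay/3")
--         else:
--             urls.append(f"{HTTPBIN}/get")
--     return urls
-- ===== SOURCE B (Python) =====
-- HTTPBIN = 'https://httpbin.org'
--
-- def build_urls(count: int):
--     # Precompute the period-15 URL pattern once, then index into it.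
--     pattern = [
--         f"{HTTPBIN}/status/500" if r % 5 == 0
--         else f"{HTTPBIN}/delay/3" if r % 3 == 0
--         else f"{HTTPBIN}/get"
--         for r in range(15)
--     ]
--     return [pattern[i % 15] for i in range(count)]
-- ===== Notes on version B (the rewrite author's own statement) =====
-- stated objective: faster
-- what changed: B precomputes the repeating fifteen-element URL pattern as a lookup table once and builds the result by indexing into it modulo the period, instead of re-evaluating the branch chain of modulo tests for every index.
import Mathlib
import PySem

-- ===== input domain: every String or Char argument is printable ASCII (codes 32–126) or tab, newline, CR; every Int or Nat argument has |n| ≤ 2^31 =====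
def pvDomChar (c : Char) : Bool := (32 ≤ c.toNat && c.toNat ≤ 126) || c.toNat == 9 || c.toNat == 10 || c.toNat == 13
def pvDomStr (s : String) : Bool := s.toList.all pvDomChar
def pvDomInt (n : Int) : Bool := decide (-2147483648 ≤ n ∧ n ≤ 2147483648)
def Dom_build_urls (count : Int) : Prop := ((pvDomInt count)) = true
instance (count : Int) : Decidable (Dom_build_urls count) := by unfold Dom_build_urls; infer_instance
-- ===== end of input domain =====

-- B precomputes the period-15 URL pattern once and indexes pattern[i % 15], instead of
-- re-evaluating the %5/%3 branch chain at every iteration (alternative decomposition).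

-- ===== PORT A =====
def build_urls (count : Int) : List String :=
  (PySem.List.pyRange 0 count 1).foldl (fun urls i =>
    if i % 5 == 0 then urls ++ ["https://httpbin.org/status/500"]
    else if i % 3 == 0 then urls ++ ["https://httpbin.org/delay/3"]
    else urls ++ ["https://httpbin.org/get"]) []

-- ===== PORT B =====
def pvPattern : List String :=
  (PySem.List.pyRange 0 15 1).map (fun r =>
    if r % 5 == 0 then "https://httpbin.org/status/500"
    else if r % 3 == 0 then "https://httpbin.org/delay/3"
    else "https://httpbin.org/get")

def build_urls_alt (count : Int) : List String :=
  (PySem.List.pyRange 0 count 1).map (fun i => PySem.List.pyGetD pvPattern (i % 15) "")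

-- ===== PRECONDITION & SPEC =====
def Spec_build_urls (count : Int) (out : List String) : Prop := out = build_urls_alt count
instance (count : Int) (out : List String) : Decidable (Spec_build_urls count out) := by unfold Spec_build_urls; infer_instance

-- ===== CLAIM (what is proved, stated in full; the proofs are below) =====
def Claim_equal_build_urls : Prop := ∀ (count : Int), Dom_build_urls count → Spec_build_urls count (build_urls count)

-- ===== LEMMAS AND PROOFS =====

-- A's append-fold is the map of its branch function.
theorem pv_foldl_append_map (l : List Int) (acc : List String) (f : Int → String) :
    l.foldl (fun urls i => urls ++ [f i]) acc = acc ++ l.map f := by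
  induction l generalizing acc with
  | nil => simp
  | cons x xs ih => simp [List.foldl, ih, List.append_assoc]

-- pointwise: for 0 ≤ i, the branch value equals the table lookup at i % 15
theorem pv_branch_eq_lookup (i : Int) (hi : 0 ≤ i) :
    (if i % 5 == 0 then "https://httpbin.org/status/500"
     else if i % 3 == 0 then "https://httpbin.org/delay/3"
     else "https://httpbin.org/get")
    = PySem.List.pyGetD pvPattern (i % 15) "" := by
  have h5 : i % 5 = (i % 15) % 5 := (Int.emod_emod_of_dvd i (by norm_num)).symm
  have h3 : i % 3 = (i % 15) % 3 := (Int.emod_emod_of_dvd i (by norm_num)).symm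
  have h0 : 0 ≤ i % 15 := Int.emod_nonneg i (by norm_num)
  have h15 : i % 15 < 15 := Int.emod_lt_of_pos i (by norm_num)
  rw [h5, h3]
  set r := i % 15 with hr
  interval_cases r <;> decide

-- ===== VERDICT (by name: the statement is the Claim_ definition above) =====
theorem build_urls_spec : Claim_equal_build_urls := by
  intro count _
  unfold Spec_build_urls build_urls build_urls_alt
  have hfun : (fun (urls : List String) (i : Int) =>
      if i % 5 == 0 then urls ++ ["https://httpbin.org/status/500"]
      else if i % 3 == 0 then urls ++ ["https://httpbin.org/delay/3"]
      else urls ++ ["https://httpbin.org/get"])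
    = (fun urls i => urls ++ [if i % 5 == 0 then "https://httpbin.org/status/500"
        else if i % 3 == 0 then "https://httpbin.org/delay/3"
        else "https://httpbin.org/get"]) := by
    funext urls i; split_ifs <;> rfl
  rw [hfun, pv_foldl_append_map]
  simp only [List.nil_append]
  apply List.map_congr_left
  intro i hi
  have := (PySem.List.mem_pyRange_one.mp hi).1
  exact pv_branch_eq_lookup i this
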